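-- pv_equiv track=rewrite | github.com/IvanRenison/ProgrammingProblems | Competitive Programming 4 The Lower Bound of Programming Contests in the 2020s/2.2.d.5_flagquiz.py | solve
-- ===== SOURCE A (Python) =====
-- from typing import List
--
-- def incongruousity(a1: List[str], a2: List[str]) -> int:
--     n: int = len(a1)
--     return sum(1 for i in range(n) if a1[i] != a2[i])
--
-- def solve(alternatives: List[List[str]]) -> List[int]:
--     N: int = len(alternatives)
--     incongruousitys: List[List[int]] = [[0] * N for _ in range(N)]
--     for i in range(N):
--         for j in range(i):
--             incongruousitys[i][j] = incongruousity(
--                 alternatives[i], alternatives[j])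
--             incongruousitys[j][i] = incongruousitys[i][j]
--
--     incongruousitys_1D: List[int] = [max(i) for i in incongruousitys]
--
--     min_incongruousity = min(incongruousitys_1D)
--
--     return [i for i in range(N) if incongruousitys_1D[i] == min_incongruousity]
-- ===== SOURCE B (Python) =====
-- from typing import List
--
--
-- def solve(alternatives: List[List[str]]) -> List[int]:
--     N = len(alternatives)
--     lens = [len(f) for f in alternatives]
--
--     # column-major sweep: tally one disagreement event per (pair, position) mismatch in a
--     # counter keyed by the ordered index pair; pair distances are never computed as a unit
--     cnt = {}
--     for k in range(max(lens, default=0)):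
--         for i in range(N):
--             if k < lens[i]:
--                 v = alternatives[i][k]
--                 for j in range(i):
--                     if alternatives[j][k] != v:
--                         p = (j, i)
--                         cnt[p] = cnt.get(p, 0) + 1
--
--     # read each flag's worst distance back from the counter (absent pairs agree everywhere)
--     worst = [0] * N
--     for (j, i), d in cnt.items():
--         if d > worst[i]:
--             worst[i] = d
--         if d > worst[j]:
--             worst[j] = d
--
--     m = min(worst)
--     return [i for i in range(N) if worst[i] == m]
-- ===== Notes on version B (the rewrite author's own statement) =====
-- stated objective: alternative
-- what changed: Instead of A's per-pair incongruousity calls filling an N x N symmetric matrix and taking row maxima, B sweeps answer positions column-major, tallies one (pair, position) disagreement event per mismatch in a dictionary counter keyed by the ordered index pair, and derives each flag's worst distance by a single running-max pass over the counter's items; pair distances are never computed as a unit and absent pairs are implicit zeros.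
-- outside the precondition, e.g. on solve([]): A raises ValueError, B raises ValueError; on solve([['x'], ['a', 'b']]): A raises IndexError, B raises IndexError
import Mathlib
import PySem

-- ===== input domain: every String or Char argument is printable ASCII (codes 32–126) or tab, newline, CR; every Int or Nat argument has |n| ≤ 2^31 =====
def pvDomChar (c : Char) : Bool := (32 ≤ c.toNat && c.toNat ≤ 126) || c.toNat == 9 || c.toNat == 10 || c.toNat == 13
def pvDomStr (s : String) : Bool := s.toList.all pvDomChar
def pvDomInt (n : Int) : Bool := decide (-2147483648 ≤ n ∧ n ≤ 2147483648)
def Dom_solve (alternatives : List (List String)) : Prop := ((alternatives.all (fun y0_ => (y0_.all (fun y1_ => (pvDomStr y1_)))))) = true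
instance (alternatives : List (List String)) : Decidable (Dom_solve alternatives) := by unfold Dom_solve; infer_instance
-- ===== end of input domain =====

-- B replaces A's per-pair distance calls and N×N matrix by a column-major sweep tallying
-- (pair, position) disagreements in a counter, read back by one pass over its items (objective: alternative).

-- ===== PORT A =====
-- sum(1 for i in range(n) if a1[i] != a2[i]); a2[i] raises when len(a2) < len(a1) (excluded by Pre_)
def incong (a1 a2 : List String) : Int :=
  (List.range a1.length).foldl (fun s i => if a1[i]? ≠ a2[i]? then s + 1 else s) 0

-- the matrix fill loops (indices of range(N)/range(i) are in range, so getD/set are exact);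
-- max(row)/min(list) raise on empty only when N = 0, which Pre_ excludes (the .getD 0 is never used there)
def solve (alternatives : List (List String)) : List Int :=
  let N := alternatives.length
  let mat := (List.range N).foldl (fun mat i =>
      (List.range i).foldl (fun mat j =>
          let mat := mat.set i ((mat.getD i []).set j (incong (alternatives.getD i []) (alternatives.getD j [])))
          mat.set j ((mat.getD j []).set i ((mat.getD i []).getD j 0)))
        mat)
    (List.replicate N (List.replicate N (0 : Int)))
  let oneD := mat.map (fun row => (PySem.List.max? row (fun x => x)).getD 0)
  let m := (PySem.List.min? oneD (fun x => x)).getD 0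
  ((List.range N).filter (fun i => oneD.getD i 0 == m)).map (fun i => ((i : Int)))

-- ===== PORT B =====
-- the column-major counting sweep: for k in range(max(lens, default=0)) / for i in range(N):
-- if k < lens[i] / for j in range(i): if mismatch: cnt[(j,i)] = cnt.get((j,i), 0) + 1
-- (indexing by getD is exact inside Pre_), then the read-back pass over cnt.items()
def solve_alt (alternatives : List (List String)) : List Int :=
  let N := alternatives.length
  let lens := alternatives.map List.length
  let cnt := (List.range (PySem.List.maxD lens (fun x => x) 0)).foldl (fun cnt k =>
      (List.range N).foldl (fun cnt i =>
        if k < lens.getD i 0 then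
          let v := (alternatives.getD i []).getD k ""
          (List.range i).foldl (fun cnt j =>
            if (alternatives.getD j []).getD k "" ≠ v then
              cnt.insert (j, i) (cnt.getD (j, i) 0 + 1)
            else cnt) cnt
        else cnt) cnt)
    (PySem.Dict.empty (κ := Nat × Nat) (ν := Int))
  let worst := cnt.items.foldl (fun w pd =>
      let w' := if pd.2 > w.getD pd.1.2 0 then w.set pd.1.2 pd.2 else w
      if pd.2 > w'.getD pd.1.1 0 then w'.set pd.1.1 pd.2 else w')
    (List.replicate N (0 : Int))
  let m := (PySem.List.min? worst (fun x => x)).getD 0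
  ((List.range N).filter (fun i => worst.getD i 0 == m)).map (fun i => ((i : Int)))

-- ===== PRECONDITION & SPEC =====
-- Pre_ excludes exactly the inputs where A raises: the empty list (min([]) is a ValueError) and
-- lists in which some later flag has more answer strings than an earlier one (IndexError in incongruousity).
def Pre_solve (alternatives : List (List String)) : Prop :=
  alternatives ≠ [] ∧ alternatives.Pairwise (fun f g => g.length ≤ f.length)
instance (alternatives : List (List String)) : Decidable (Pre_solve alternatives) := by
  unfold Pre_solve; infer_instance

def pvWitness_solve : List (List String) := [["a", "b"], ["a", "c"]]

def Spec_solve (alternatives : List (List String)) (out : List Int) : Prop := out = solve_alt alternatives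
instance (alternatives : List (List String)) (out : List Int) : Decidable (Spec_solve alternatives out) := by unfold Spec_solve; infer_instance

-- ===== CLAIM (what is proved, stated in full; the proofs are below) =====
def Claim_equal_solve : Prop := ∀ (alternatives : List (List String)), Dom_solve alternatives → Pre_solve alternatives → Spec_solve alternatives (solve alternatives)

-- ===== LEMMAS AND PROOFS =====

-- the pair distance A stores at both (i,j) and (j,i): first argument is the larger index
def ddist (a : List (List String)) (i j : Nat) : Int :=
  incong (a.getD (max i j) []) (a.getD (min i j) [])

-- matrix entry after the outer loop has finished rows < p and row p has processed inner indices < t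
def entry (a : List (List String)) (p t i j : Nat) : Int :=
  if i ≠ j ∧ (max i j < p ∨ (max i j = p ∧ min i j < t)) then ddist a i j else 0

def matI (a : List (List String)) (N p t : Nat) : List (List Int) :=
  (List.range N).map (fun i => (List.range N).map (fun j => entry a p t i j))

theorem ddist_comm (a : List (List String)) (i j : Nat) : ddist a i j = ddist a j i := by
  simp [ddist, Nat.max_comm, Nat.min_comm]

theorem matI_inner_step (a : List (List String)) (N p t : Nat) (ht : t < p) (hp : p < N) :
    ((matI a N p t).set p (((matI a N p t).getD p []).set t
        (incong (a.getD p []) (a.getD t [])))).set t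
      ((((matI a N p t).set p (((matI a N p t).getD p []).set t
            (incong (a.getD p []) (a.getD t [])))).getD t []).set p
        ((((matI a N p t).set p (((matI a N p t).getD p []).set t
            (incong (a.getD p []) (a.getD t [])))).getD p []).getD t 0))
      = matI a N p (t + 1) := by
  have ht' : t < N := lt_trans ht hp
  have hrow : ∀ i, i < N → (matI a N p t).getD i [] = (List.range N).map (fun j => entry a p t i j) := by
    intro i hi
    unfold matI
    rw [List.getD_eq_getElem?_getD]
    simp [hi]
  have hd : incong (a.getD p []) (a.getD t []) = ddist a p t := by
    unfold ddist
    rw [Nat.max_eq_left (le_of_lt ht), Nat.min_eq_right (le_of_lt ht)]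
  -- rows of the first set
  have hget1 : ∀ i, i < N → i ≠ p →
      ((matI a N p t).set p (((matI a N p t).getD p []).set t
        (incong (a.getD p []) (a.getD t [])))).getD i [] = (List.range N).map (fun j => entry a p t i j) := by
    intro i hi hne
    rw [List.getD_eq_getElem?_getD, List.getElem?_set_ne (by omega), ← List.getD_eq_getElem?_getD]
    exact hrow i hi
  have hget1p :
      ((matI a N p t).set p (((matI a N p t).getD p []).set t
        (incong (a.getD p []) (a.getD t [])))).getD p [] =
        ((List.range N).map (fun j => entry a p t p j)).set t (incong (a.getD p []) (a.getD t [])) := by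
    rw [List.getD_eq_getElem?_getD, List.getElem?_set_self (by simp [matI, hp]), Option.getD_some, hrow p hp]
  have hrb : ((((matI a N p t).set p (((matI a N p t).getD p []).set t
        (incong (a.getD p []) (a.getD t [])))).getD p []).getD t 0)
      = incong (a.getD p []) (a.getD t []) := by
    rw [hget1p, List.getD_eq_getElem?_getD, List.getElem?_set_self (by simp [ht']), Option.getD_some]
  apply List.ext_getElem
  · simp [matI]
  · intro i hi1 hi2
    have hiN : i < N := by simpa [matI] using hi2
    rw [List.getElem_set]
    by_cases hit : t = i
    · subst hit
      rw [if_pos rfl, hget1 t ht' (by omega), hrb, hd]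
      apply List.ext_getElem
      · simp [matI]
      · intro j hj1 hj2
        have hjN : j < N := by simpa using hj1
        rw [List.getElem_set]
        simp only [matI, List.getElem_map, List.getElem_range]
        by_cases hjp : p = j
        · subst hjp
          rw [if_pos rfl]
          unfold entry
          rw [if_pos ⟨by omega, by omega⟩, ddist_comm]
        · rw [if_neg hjp]
          unfold entry
          split_ifs <;> first | rfl | omega
    · rw [if_neg hit, List.getElem_set]
      by_cases hip : p = i
      · subst hip
        rw [if_pos rfl, hrow p hp, hd]
        apply List.ext_getElem
        · simp [matI]
        · intro j hj1 hj2
          have hjN : j < N := by simpa using hj1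
          rw [List.getElem_set]
          simp only [matI, List.getElem_map, List.getElem_range]
          by_cases hjt : t = j
          · subst hjt
            rw [if_pos rfl]
            unfold entry
            rw [if_pos ⟨by omega, by omega⟩]
          · rw [if_neg hjt]
            unfold entry
            split_ifs <;> first | rfl | omega
      · rw [if_neg hip]
        simp only [matI, List.getElem_map, List.getElem_range]
        apply List.ext_getElem
        · simp
        · intro j hj1 hj2
          simp only [List.getElem_map, List.getElem_range]
          unfold entry
          split_ifs <;> first | rfl | omega

theorem matI_zero (a : List (List String)) (N : Nat) :
    matI a N 0 0 = List.replicate N (List.replicate N (0 : Int)) := by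
  have he : ∀ i j : Nat, entry a 0 0 i j = 0 := by
    intro i j; unfold entry; rw [if_neg (by omega)]
  simp [matI, he, List.map_const']

theorem matI_inner (a : List (List String)) (N p : Nat) (hp : p < N) :
    ∀ t, t ≤ p →
    (List.range t).foldl (fun mat j =>
        (mat.set p ((mat.getD p []).set j (incong (a.getD p []) (a.getD j [])))).set j
          (((mat.set p ((mat.getD p []).set j (incong (a.getD p []) (a.getD j [])))).getD j []).set p
            (((mat.set p ((mat.getD p []).set j (incong (a.getD p []) (a.getD j [])))).getD p []).getD j 0)))
      (matI a N p 0) = matI a N p t := by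
  intro t
  induction t with
  | zero => intro _; rfl
  | succ t ih =>
    intro htp
    rw [List.range_succ, List.foldl_append, ih (by omega), List.foldl_cons, List.foldl_nil]
    exact matI_inner_step a N p t (by omega) hp

theorem matI_trans (a : List (List String)) (N p : Nat) :
    matI a N p p = matI a N (p + 1) 0 := by
  have he : ∀ i j : Nat, entry a p p i j = entry a (p + 1) 0 i j := by
    intro i j; unfold entry; split_ifs <;> first | rfl | omega
  simp only [matI, he]

theorem matI_outer (a : List (List String)) (N : Nat) :
    ∀ k, k ≤ N →
    (List.range k).foldl (fun mat i =>
      (List.range i).foldl (fun mat j =>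
          (mat.set i ((mat.getD i []).set j (incong (a.getD i []) (a.getD j [])))).set j
            (((mat.set i ((mat.getD i []).set j (incong (a.getD i []) (a.getD j [])))).getD j []).set i
              (((mat.set i ((mat.getD i []).set j (incong (a.getD i []) (a.getD j [])))).getD i []).getD j 0)))
        mat)
      (matI a N 0 0) = matI a N k 0 := by
  intro k
  induction k with
  | zero => intro _; rfl
  | succ k ih =>
    intro hk
    rw [List.range_succ, List.foldl_append, ih (by omega), List.foldl_cons, List.foldl_nil]
    rw [matI_inner a N k (by omega) k (le_refl k), matI_trans]

theorem matI_final (a : List (List String)) :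
    (List.range a.length).foldl (fun mat i =>
      (List.range i).foldl (fun mat j =>
          let mat := mat.set i ((mat.getD i []).set j (incong (a.getD i []) (a.getD j [])))
          mat.set j ((mat.getD j []).set i ((mat.getD i []).getD j 0)))
        mat)
      (List.replicate a.length (List.replicate a.length (0 : Int)))
      = matI a a.length a.length 0 := by
  rw [← matI_zero a a.length]
  exact matI_outer a a.length a.length (le_refl _)

-- ===== B-side: the event count of an ordered pair is the pair distance =====

-- proof-side model of B's sweep: the stream of (pair, position) disagreement events it tallies
def events (alternatives : List (List String)) : List (Nat × Nat) :=
  let N := alternatives.length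
  let lens := alternatives.map List.length
  (List.range (PySem.List.maxD lens (fun x => x) 0)).flatMap (fun k =>
    ((List.range N).filter (fun i => k < lens.getD i 0)).flatMap (fun i =>
      ((List.range i).filter (fun j =>
          (alternatives.getD j []).getD k "" ≠ (alternatives.getD i []).getD k "")).map
        (fun j => (j, i))))


-- count distributes over flatMap
theorem count_flatMap {α β : Type} [BEq β] (l : List α) (f : α → List β) (b : β) :
    (l.flatMap f).count b = (l.map (fun x => (f x).count b)).sum := by
  induction l with
  | nil => rfl
  | cons x t ih => simp [List.flatMap_cons, List.count_append, ih]

-- sum of a map that vanishes except at one element of a nodup list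
theorem sum_map_single {α : Type} [DecidableEq α] (l : List α) (g : α → Nat) (x : α)
    (hnd : l.Nodup) (hx : x ∈ l) (h0 : ∀ y ∈ l, y ≠ x → g y = 0) :
    (l.map g).sum = g x := by
  induction l with
  | nil => simp at hx
  | cons z t ih =>
    simp only [List.map_cons, List.sum_cons]
    rcases List.mem_cons.mp hx with h | h
    · subst h
      have : ∀ y ∈ t, g y = 0 := by
        intro y hy
        exact h0 y (by simp [hy]) (by rintro rfl; exact (List.nodup_cons.mp hnd).1 hy)
      rw [List.sum_eq_zero (by intro v hv; rcases List.mem_map.mp hv with ⟨y, hy, rfl⟩; exact this y hy)]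
      omega
    · rw [h0 z (by simp) (by rintro rfl; exact (List.nodup_cons.mp hnd).1 h)]
      rw [ih (List.nodup_cons.mp hnd).2 h (fun y hy => h0 y (by simp [hy]))]
      omega

-- the inner two comprehensions of one column k produce (j,i) exactly once iff the column counts
theorem count_col (a : List (List String)) (k j i : Nat) (hji : j < i) (hiN : i < a.length) :
    ((((List.range a.length).filter (fun i' => k < (a.map List.length).getD i' 0)).flatMap (fun i' =>
        ((List.range i').filter (fun j' =>
            (a.getD j' []).getD k "" ≠ (a.getD i' []).getD k "")).map
          (fun j' => (j', i')))).count (j, i))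
      = if k < (a.getD i []).length ∧ (a.getD j []).getD k "" ≠ (a.getD i []).getD k "" then 1 else 0 := by
  have hlen : (a.map List.length).getD i 0 = (a.getD i []).length := by
    rw [List.getD_eq_getElem?_getD, List.getD_eq_getElem?_getD, List.getElem?_map,
      List.getElem?_eq_getElem hiN]
    simp
  rw [count_flatMap]
  have hblock0 : ∀ i' : Nat, i' ≠ i →
      ((((List.range i').filter (fun j' =>
          (a.getD j' []).getD k "" ≠ (a.getD i' []).getD k "")).map
        (fun j' => ((j', i') : Nat × Nat))).count (j, i)) = 0 := by
    intro i' hne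
    apply List.count_eq_zero.mpr
    intro hm
    rcases List.mem_map.mp hm with ⟨j', _, he⟩
    exact hne (congrArg Prod.snd he)
  by_cases hk : k < (a.getD i []).length
  · rw [sum_map_single _ _ i ((List.nodup_range).filter _)
      (List.mem_filter.mpr ⟨List.mem_range.mpr hiN, by rw [hlen]; exact decide_eq_true hk⟩)
      (fun i' _ hne => hblock0 i' hne)]
    have hinj : Function.Injective (fun j' : Nat => ((j', i) : Nat × Nat)) := by
      intro x y h
      simpa using congrArg Prod.fst h
    rw [show ((j, i) : Nat × Nat) = (fun j' : Nat => ((j', i) : Nat × Nat)) j from rfl,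
      List.count_map_of_injective _ _ hinj]
    by_cases hd : (a.getD j []).getD k "" ≠ (a.getD i []).getD k ""
    · rw [if_pos ⟨hk, hd⟩, List.count_filter
        (p := fun j' => decide ((a.getD j' []).getD k "" ≠ (a.getD i []).getD k ""))
        (a := j) (l := List.range i) (decide_eq_true hd),
        List.count_eq_one_of_mem List.nodup_range (List.mem_range.mpr hji)]
    · rw [if_neg (by tauto)]
      apply List.count_eq_zero.mpr
      intro hm
      exact hd (of_decide_eq_true (List.mem_filter.mp hm).2)
  · rw [if_neg (fun h => hk h.1)]
    apply List.sum_eq_zero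
    intro v hv
    rcases List.mem_map.mp hv with ⟨i', hi', rfl⟩
    by_cases hii : i' = i
    · subst hii
      have := of_decide_eq_true (List.mem_filter.mp hi').2
      rw [hlen] at this
      exact absurd this hk
    · exact hblock0 i' hii

-- a 0/1-valued map sums to the countP of its condition
theorem sum_ite_eq_countP {α : Type} (l : List α) (p : α → Bool) :
    (l.map (fun x => if p x then 1 else 0)).sum = l.countP p := by
  induction l with
  | nil => rfl
  | cons x t ih =>
    simp only [List.map_cons, List.sum_cons, List.countP_cons, ih]
    by_cases h : p x
    · simp [h]
      omega
    · simp [h]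

-- summing the column indicators over all columns gives incong (the i-th flag's length bounds the sum)
theorem count_events (a : List (List String)) (j i : Nat) (hji : j < i) (hiN : i < a.length)
    (hlen : (a.getD i []).length ≤ (a.getD j []).length) :
    ((events a).count (j, i) : Int) = incong (a.getD i []) (a.getD j []) := by
  have hjN : j < a.length := lt_trans hji hiN
  -- maxlen bound
  have hmax : (a.getD i []).length ≤ PySem.List.maxD (a.map List.length) (fun x => x) 0 := by
    have hmem : (a.getD i []).length ∈ a.map List.length := by
      rw [List.getD_eq_getElem?_getD, List.getElem?_eq_getElem hiN, Option.getD_some]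
      exact List.mem_map.mpr ⟨_, List.getElem_mem hiN, rfl⟩
    rcases l : a.map List.length with _ | ⟨x, t⟩
    · rw [l] at hmem; simp at hmem
    · rw [PySem.List.maxD, PySem.List.max?_id_cons, Option.getD_some]
      have := PySem.List.max?_isMax (xs := x :: t) (key := fun y => y) (m := t.foldl max x)
        (by rw [PySem.List.max?_id_cons])
      rw [l] at hmem
      exact this _ hmem
  simp only [events]
  rw [count_flatMap]
  -- each column k contributes its indicator
  have hcol : ∀ k : Nat,
      (fun k => ((((List.range a.length).filter (fun i' => k < (a.map List.length).getD i' 0)).flatMap (fun i' =>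
        ((List.range i').filter (fun j' =>
            (a.getD j' []).getD k "" ≠ (a.getD i' []).getD k "")).map
          (fun j' => (j', i')))).count (j, i))) k
      = if k < (a.getD i []).length ∧ (a.getD j []).getD k "" ≠ (a.getD i []).getD k "" then 1 else 0 :=
    fun k => count_col a k j i hji hiN
  rw [List.map_congr_left (fun k _ => hcol k)]
  -- split range maxlen at the flag length; the tail sums to zero
  set L := (a.getD i []).length with hL
  set M := PySem.List.maxD (a.map List.length) (fun x => x) 0 with hM
  have hsplit : List.range M = List.range L ++ (List.range (M - L)).map (fun t => L + t) := by
    rw [← List.range_add, Nat.add_sub_cancel' hmax]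
  rw [hsplit, List.map_append, List.sum_append, List.map_map]
  have htail : (((List.range (M - L)).map ((fun k =>
      if k < L ∧ (a.getD j []).getD k "" ≠ (a.getD i []).getD k "" then 1 else 0) ∘ (fun t => L + t))).sum) = 0 := by
    apply List.sum_eq_zero
    intro v hv
    rcases List.mem_map.mp hv with ⟨t, _, rfl⟩
    simp only [Function.comp]
    rw [if_neg (by omega)]
  rw [htail, Nat.add_zero]
  -- now compare with incong's counting fold
  unfold incong
  have hfold := PySem.List.foldl_count_if
    (fun k => decide ((a.getD i [])[k]? ≠ (a.getD j [])[k]?)) (List.range (a.getD i []).length) (0 : Int)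
  simp only [decide_eq_true_eq] at hfold
  rw [hfold, zero_add, ← hL]
  have hcnt : ((List.range L).map (fun k =>
      if k < L ∧ (a.getD j []).getD k "" ≠ (a.getD i []).getD k "" then 1 else 0)).sum
      = (List.range L).countP (fun k => (a.getD i [])[k]? ≠ (a.getD j [])[k]?) := by
    rw [← sum_ite_eq_countP]
    apply congrArg List.sum
    apply List.map_congr_left
    intro k hk
    have hkL : k < L := List.mem_range.mp hk
    have hkj : k < (a.getD j []).length := lt_of_lt_of_le hkL hlen
    have hgi : (a.getD i [])[k]? = some ((a.getD i []).getD k "") := by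
      rw [List.getElem?_eq_getElem hkL, List.getD_eq_getElem _ "" hkL]
    have hgj : (a.getD j [])[k]? = some ((a.getD j []).getD k "") := by
      rw [List.getElem?_eq_getElem hkj, List.getD_eq_getElem _ "" hkj]
    simp only [hgi, hgj, decide_eq_true_eq, ne_eq, Option.some.injEq]
    rcases eq_or_ne ((a.getD j []).getD k "") ((a.getD i []).getD k "") with h | h
    · rw [if_neg (fun hc => hc.2 h), if_neg (fun hc => hc h.symm)]
    · rw [if_pos ⟨hkL, h⟩, if_pos (fun hc => h hc.symm)]
  rw [hcnt]

-- ===== max bookkeeping (shared shape lemmas) =====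

theorem fmax_mono : ∀ (t : List Int) {x y : Int}, x ≤ y → t.foldl max x ≤ t.foldl max y := by
  intro t
  induction t with
  | nil => intro x y h; simpa using h
  | cons a t ih => intro x y h; exact ih (by omega)

theorem fmax_le : ∀ (t : List Int) {x m : Int}, x ≤ m → (∀ y ∈ t, y ≤ m) → t.foldl max x ≤ m := by
  intro t
  induction t with
  | nil => intro x m h _; simpa using h
  | cons a t ih =>
    intro x m h hm
    exact ih (by have := hm a (by simp); omega) (fun y hy => hm y (by simp [hy]))

theorem maxgetD_eq_foldl0 (l : List Int) (h0 : (0:Int) ∈ l) :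
    (PySem.List.max? l (fun x => x)).getD 0 = l.foldl max 0 := by
  cases l with
  | nil => simp at h0
  | cons x t =>
    rw [PySem.List.max?_id_cons, Option.getD_some, List.foldl_cons]
    have hF := PySem.List.le_foldl_max t x
    have h0F : (0:Int) ≤ t.foldl max x := by
      rcases List.mem_cons.mp h0 with h | h
      · omega
      · exact hF.2 0 h
    exact le_antisymm (fmax_mono t (by omega)) (fmax_le t (by omega) hF.2)

-- B's sweep builds exactly the counter of the event stream
theorem cnt_eq (a : List (List String)) :
    (List.range (PySem.List.maxD (a.map List.length) (fun x => x) 0)).foldl (fun cnt k =>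
      (List.range a.length).foldl (fun cnt i =>
        if k < (a.map List.length).getD i 0 then
          let v := (a.getD i []).getD k ""
          (List.range i).foldl (fun cnt j =>
            if (a.getD j []).getD k "" ≠ v then
              cnt.insert (j, i) (cnt.getD (j, i) 0 + 1)
            else cnt) cnt
        else cnt) cnt)
      (PySem.Dict.empty (κ := Nat × Nat) (ν := Int))
    = PySem.Dict.counter (events a) := by
  rw [← PySem.Dict.foldl_insert_getD_add_one_eq_counter]
  simp only [events, List.foldl_flatMap, List.foldl_filter, List.foldl_map, decide_eq_true_eq]

theorem mem_events (a : List (List String)) (p : Nat × Nat) (hp : p ∈ events a) :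
    p.1 < p.2 ∧ p.2 < a.length := by
  obtain ⟨j, i⟩ := p
  simp only [events, List.mem_flatMap, List.mem_map, List.mem_filter, List.mem_range] at hp
  obtain ⟨k, _, i', ⟨hi', _⟩, j', hj', he⟩ := hp
  obtain ⟨rfl, rfl⟩ : j' = j ∧ i' = i := by
    constructor <;> [exact congrArg Prod.fst he; exact congrArg Prod.snd he]
  exact ⟨hj'.1, hi'⟩

-- the running-max step the read-back loop performs at index x for one item
def tstep (x : Nat) (m : Int) (pd : (Nat × Nat) × Int) : Int :=
  if pd.1.1 = x ∨ pd.1.2 = x then max m pd.2 else m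

theorem le_tfold_self (x : Nat) : ∀ (P : List ((Nat × Nat) × Int)) (m : Int),
    m ≤ P.foldl (tstep x) m := by
  intro P
  induction P with
  | nil => intro m; simp
  | cons pd t ih =>
    intro m
    refine le_trans ?_ (ih (tstep x m pd))
    unfold tstep
    split_ifs <;> omega

theorem le_tfold_mem (x : Nat) : ∀ (P : List ((Nat × Nat) × Int)) (m : Int) (pd : (Nat × Nat) × Int),
    pd ∈ P → (pd.1.1 = x ∨ pd.1.2 = x) → pd.2 ≤ P.foldl (tstep x) m := by
  intro P
  induction P with
  | nil => intro m pd h; simp at h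
  | cons q t ih =>
    intro m pd h htouch
    rcases List.mem_cons.mp h with h | h
    · subst h
      refine le_trans ?_ (le_tfold_self x t (tstep x m pd))
      unfold tstep
      rw [if_pos htouch]
      omega
    · exact ih (tstep x m q) pd h htouch

theorem tfold_le (x : Nat) : ∀ (P : List ((Nat × Nat) × Int)) {m c : Int}, m ≤ c →
    (∀ pd ∈ P, (pd.1.1 = x ∨ pd.1.2 = x) → pd.2 ≤ c) → P.foldl (tstep x) m ≤ c := by
  intro P
  induction P with
  | nil => intro m c h _; simpa using h
  | cons pd t ih =>
    intro m c h hb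
    refine ih ?_ (fun q hq => hb q (by simp [hq]))
    unfold tstep
    split_ifs with ht
    · have := hb pd (by simp) ht
      omega
    · exact h

-- setting a tabulated list's cell to its own value changes nothing
theorem set_tab_self (N : Nat) (f : Nat → Int) (i : Nat) :
    ((List.range N).map f).set i (f i) = (List.range N).map f := by
  apply List.ext_getElem
  · simp
  · intro x hx1 hx2
    rw [List.getElem_set]
    split_ifs with h
    · subst h; simp
    · rfl

-- one pass of the read-back loop on a list that is a tabulation of f
theorem worst_step (N : Nat) (f : Nat → Int) (pd : (Nat × Nat) × Int)
    (hji : pd.1.1 < pd.1.2) (hiN : pd.1.2 < N) :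
    (let w' := if pd.2 > ((List.range N).map f).getD pd.1.2 0
        then ((List.range N).map f).set pd.1.2 pd.2 else (List.range N).map f
     if pd.2 > w'.getD pd.1.1 0 then w'.set pd.1.1 pd.2 else w')
    = (List.range N).map (fun x => tstep x (f x) pd) := by
  obtain ⟨⟨j, i⟩, d⟩ := pd
  simp only at hji hiN
  show (if d > (if d > ((List.range N).map f).getD i 0
          then ((List.range N).map f).set i d else (List.range N).map f).getD j 0
        then (if d > ((List.range N).map f).getD i 0
          then ((List.range N).map f).set i d else (List.range N).map f).set j d
        else (if d > ((List.range N).map f).getD i 0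
          then ((List.range N).map f).set i d else (List.range N).map f))
      = (List.range N).map (fun x => tstep x (f x) ((j, i), d))
  have hjN : j < N := lt_trans hji hiN
  have hgetD : ∀ y, y < N → ((List.range N).map f).getD y 0 = f y := by
    intro y hy
    rw [List.getD_eq_getElem?_getD, List.getElem?_map, List.getElem?_range hy]
    rfl
  -- normalise the two conditional writes into unconditional max-writes
  have hset1 : (if d > ((List.range N).map f).getD i 0
        then ((List.range N).map f).set i d else ((List.range N).map f))
      = ((List.range N).map f).set i (max (f i) d) := by
    rw [hgetD i hiN]
    split_ifs with h
    · congr 1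
      omega
    · rw [show max (f i) d = f i by omega, set_tab_self]
  rw [hset1]
  have hgj : (((List.range N).map f).set i (max (f i) d)).getD j 0 = f j := by
    rw [List.getD_eq_getElem?_getD, List.getElem?_set_ne (by omega), ← List.getD_eq_getElem?_getD,
      hgetD j hjN]
  have hset2 : (if d > (((List.range N).map f).set i (max (f i) d)).getD j 0
        then (((List.range N).map f).set i (max (f i) d)).set j d
        else ((List.range N).map f).set i (max (f i) d))
      = (((List.range N).map f).set i (max (f i) d)).set j (max (f j) d) := by
    rw [hgj]
    split_ifs with h
    · congr 1
      omega
    · rw [show max (f j) d = f j by omega]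
      have hid : ((((List.range N).map f).set i (max (f i) d)).set j (f j))
          = ((List.range N).map f).set i (max (f i) d) := by
        apply List.ext_getElem
        · simp
        · intro x hx1 hx2
          rw [List.getElem_set]
          split_ifs with h2
          · subst h2
            rw [List.getElem_set, if_neg (by omega), List.getElem_map, List.getElem_range]
          · rfl
      rw [hid]
  rw [hset2]
  apply List.ext_getElem
  · simp
  · intro x hx1 hx2
    have hxN : x < N := by simpa using hx2
    simp only [List.getElem_set, List.getElem_map, List.getElem_range, tstep]
    rcases eq_or_ne j x with rfl | hxj
    · rw [if_pos rfl, if_pos (Or.inl rfl)]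
    · rw [if_neg hxj]
      rcases eq_or_ne i x with rfl | hxi
      · rw [if_pos rfl, if_pos (Or.inr rfl)]
      · rw [if_neg hxi, if_neg (by tauto)]

-- the whole read-back loop tabulates the conditional running maxima
theorem worst_fold (N : Nat) (P : List ((Nat × Nat) × Int))
    (hP : ∀ pd ∈ P, pd.1.1 < pd.1.2 ∧ pd.1.2 < N) :
    P.foldl (fun w pd =>
        let w' := if pd.2 > w.getD pd.1.2 0 then w.set pd.1.2 pd.2 else w
        if pd.2 > w'.getD pd.1.1 0 then w'.set pd.1.1 pd.2 else w')
      (List.replicate N (0 : Int))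
    = (List.range N).map (fun x => P.foldl (tstep x) 0) := by
  induction P using List.reverseRecOn with
  | nil =>
    rw [List.foldl_nil]
    have h0 : (List.range N).map (fun x => List.foldl (tstep x) 0 []) = (List.range N).map (fun _ => (0 : Int)) := rfl
    rw [h0, List.map_const', List.length_range]
  | append_singleton P pd ih =>
    obtain ⟨hji, hiN⟩ := hP pd (by simp)
    rw [List.foldl_append, ih (fun q hq => hP q (by simp [hq])), List.foldl_cons, List.foldl_nil,
      worst_step N (fun x => P.foldl (tstep x) 0) pd hji hiN]
    apply List.map_congr_left
    intro x _
    rw [List.foldl_append, List.foldl_cons, List.foldl_nil]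

-- A's 1-D row-max list equals the tabulation B's read-back loop produces from the counter
theorem oneD_eq_worst (a : List (List String)) (hpw : a.Pairwise (fun f g => g.length ≤ f.length)) :
    (matI a a.length a.length 0).map (fun row => (PySem.List.max? row (fun x => x)).getD 0)
      = (List.range a.length).map (fun x =>
          (PySem.Dict.counter (events a)).items.foldl (tstep x) 0) := by
  have hlen : ∀ q p : Nat, q < p → p < a.length → (a.getD p []).length ≤ (a.getD q []).length := by
    intro q p hqp hp
    have hq : q < a.length := by omega
    rw [List.getD_eq_getElem?_getD, List.getD_eq_getElem?_getD, List.getElem?_eq_getElem hp,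
      List.getElem?_eq_getElem hq]
    simp only [Option.getD_some]
    exact List.pairwise_iff_getElem.mp hpw q p hq hp hqp
  have hcnt_ord : ∀ pj pi : Nat, pj < pi → pi < a.length →
      ((events a).count (pj, pi) : Int) = ddist a pi pj := by
    intro pj pi hji hiN
    rw [count_events a pj pi hji hiN (hlen pj pi hji hiN)]
    rw [ddist, Nat.max_eq_left (le_of_lt hji), Nat.min_eq_right (le_of_lt hji)]
  have hitems : ∀ pd : (Nat × Nat) × Int, pd ∈ (PySem.Dict.counter (events a)).items →
      pd.1 ∈ events a ∧ pd.2 = ((events a).count pd.1 : Int) := by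
    intro pd hpd
    rw [PySem.Dict.items_counter] at hpd
    rcases List.mem_map.mp hpd with ⟨p, hpmem, rfl⟩
    exact ⟨(PySem.Set.mem_ofList _ _).mp hpmem, rfl⟩
  unfold matI
  rw [List.map_map]
  apply List.map_congr_left
  intro x hx
  have hxN : x < a.length := List.mem_range.mp hx
  simp only [Function.comp]
  have hrow : (List.range a.length).map (fun j => entry a a.length 0 x j)
      = (List.range a.length).map (fun j => if x ≠ j then ddist a x j else 0) := by
    apply List.map_congr_left
    intro j hj
    have hjN : j < a.length := List.mem_range.mp hj
    unfold entry
    split_ifs <;> first | rfl | omega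
  rw [hrow, maxgetD_eq_foldl0 _ (List.mem_map.mpr ⟨x, hx, by simp⟩)]
  -- shorthand for both sides
  set L1 := (List.range a.length).map (fun j => if x ≠ j then ddist a x j else 0) with hL1
  have hAmem : ∀ y ∈ L1, y ≤ L1.foldl max 0 := (PySem.List.le_foldl_max L1 0).2
  have hA0 : (0 : Int) ≤ L1.foldl max 0 := hAmem 0 (List.mem_map.mpr ⟨x, hx, by simp⟩)
  apply le_antisymm
  · -- every element of A's row is dominated by the read-back maximum
    apply fmax_le L1 (le_tfold_self x _ 0)
    intro y hy
    rcases List.mem_map.mp hy with ⟨j, hj, rfl⟩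
    have hjN : j < a.length := List.mem_range.mp hj
    by_cases hxj : x ≠ j
    · rw [if_pos hxj]
      by_cases hpos : 0 < ddist a x j
      · -- the ordered pair occurs in the event stream; its item dominates
        set op : Nat × Nat := if j < x then (j, x) else (x, j) with hop
        have hopd : ((events a).count op : Int) = ddist a x j := by
          rcases Nat.lt_or_ge j x with h | h
          · rw [hop, if_pos h, hcnt_ord j x h hxN]
          · have h' : x < j := by omega
            rw [hop, if_neg (by omega), hcnt_ord x j h' hjN, ddist_comm]
        have hmem : op ∈ events a := by
          apply List.count_pos_iff.mp
          omega
        have hitem : (op, ((events a).count op : Int)) ∈ (PySem.Dict.counter (events a)).items := by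
          rw [PySem.Dict.items_counter]
          exact List.mem_map.mpr ⟨op, (PySem.Set.mem_ofList _ _).mpr hmem, rfl⟩
        have htouch : op.1 = x ∨ op.2 = x := by
          rcases Nat.lt_or_ge j x with h | h
          · right; rw [hop, if_pos h]
          · left; rw [hop, if_neg (by omega)]
        have := le_tfold_mem x _ 0 (op, ((events a).count op : Int)) hitem htouch
        simpa [hopd] using this
      · exact le_trans (by omega) (le_tfold_self x _ 0)
    · rw [if_neg hxj]
      exact le_tfold_self x _ 0
  · -- every item touching x is one of A's row entries
    apply tfold_le x _ hA0
    intro pd hpd htouch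
    obtain ⟨hpmem, hval⟩ := hitems pd hpd
    obtain ⟨hji, hiN⟩ := mem_events a pd.1 hpmem
    obtain ⟨⟨pj, pi⟩, d⟩ := pd
    simp only at hji hiN htouch hval ⊢
    have hvd : d = ddist a pi pj := by rw [hval]; exact hcnt_ord pj pi hji hiN
    rcases htouch with rfl | rfl
    · -- pj = x: the entry at column pi
      apply hAmem
      refine List.mem_map.mpr ⟨pi, List.mem_range.mpr hiN, ?_⟩
      rw [if_pos (by omega), hvd, ddist_comm]
    · -- pi = x: the entry at column pj
      apply hAmem
      refine List.mem_map.mpr ⟨pj, List.mem_range.mpr (lt_trans hji hiN), ?_⟩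
      rw [if_pos (by omega), hvd]

-- ===== VERDICT (by name: the statement is the Claim_ definition above) =====
theorem solve_spec : Claim_equal_solve := by
  intro a _ hpre
  unfold Spec_solve
  simp only [solve, solve_alt]
  have hitems : ∀ pd ∈ (PySem.Dict.counter (events a)).items, pd.1.1 < pd.1.2 ∧ pd.1.2 < a.length := by
    intro pd hpd
    rw [PySem.Dict.items_counter] at hpd
    rcases List.mem_map.mp hpd with ⟨p, hpmem, rfl⟩
    exact mem_events a p ((PySem.Set.mem_ofList _ _).mp hpmem)
  rw [matI_final a, cnt_eq a, worst_fold a.length _ hitems, oneD_eq_worst a hpre.2]
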